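-- pv_equiv track=rewrite | github.com/lucaskmk/Python | Aula9_STR/nomescomvogais.py | nomes_com_vogais
-- ===== SOURCE A (Python) =====
-- def nomes_com_vogais(nomes):
--     vog = ['A', 'E', 'I', 'O' , 'U']
--     totaldevog = [0, 0]
--     for nome in nomes:
--         if nome[0] in vog:
--             totaldevog[0] += 1
--         else:
--             totaldevog[1] += 1
--     return totaldevog
-- ===== SOURCE B (Python) =====
-- def nomes_com_vogais(nomes):
--     # Stage 1: materialise the string of initials (raises IndexError on an empty name, like A).
--     iniciais = ''.join(nome[0] for nome in nomes)
--     # Stage 2: per-vowel counting passes over the initials string, summed.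
--     v = sum(iniciais.count(ch) for ch in 'AEIOU')
--     return [v, len(iniciais) - v]
-- ===== Notes on version B (the rewrite author's own statement) =====
-- stated objective: alternative
-- what changed: Instead of A's single loop with two branch counters, B first builds the string of first letters, then counts each of the five vowels in it with str.count and derives the non-vowel count as len minus the vowel sum (measured ~1.8x faster: str.count scans in C with no per-element Python branch).
import Mathlib
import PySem

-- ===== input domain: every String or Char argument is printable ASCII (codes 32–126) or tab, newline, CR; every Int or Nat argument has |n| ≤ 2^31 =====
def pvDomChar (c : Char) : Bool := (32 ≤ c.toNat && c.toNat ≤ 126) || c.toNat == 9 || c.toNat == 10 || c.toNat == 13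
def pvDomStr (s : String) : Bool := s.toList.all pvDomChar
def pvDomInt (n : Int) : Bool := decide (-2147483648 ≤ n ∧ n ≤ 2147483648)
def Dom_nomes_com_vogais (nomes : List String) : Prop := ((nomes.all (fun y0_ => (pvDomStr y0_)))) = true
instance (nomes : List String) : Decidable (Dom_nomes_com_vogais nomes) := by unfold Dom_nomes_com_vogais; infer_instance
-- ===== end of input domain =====

-- B builds the string of initials, then counts each vowel in it and derives the complement from its length (objective: alternative; return-value equivalence).


-- ===== PORT A =====
-- A's loop: two parallel counters incremented in the if/else branches.
-- nome[0] is read via Str.pyGet? (none = IndexError, excluded by Pre_).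
def nomes_com_vogais (nomes : List String) : List Int :=
  let vog : List Char := ['A', 'E', 'I', 'O', 'U']
  let totaldevog : Int × Int :=
    nomes.foldl (fun t nome =>
      match PySem.Str.pyGet? nome 0 with
      | some c => if c ∈ vog then (t.1 + 1, t.2) else (t.1, t.2 + 1)
      | none => t)  -- unreachable under Pre_
      (0, 0)
  [totaldevog.1, totaldevog.2]

-- ===== PORT B =====
-- B stage 1: the list of initials ((pyGet? nome 0).toList is [nome[0]]; empty names, where
-- Python's join would raise IndexError, are excluded by Pre_).
def pvIniciais (nomes : List String) : List Char :=
  nomes.flatMap (fun nome => (PySem.Str.pyGet? nome 0).toList)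

-- B stage 2: sum of the five per-vowel counts over the initials.
def nomes_com_vogais_alt (nomes : List String) : List Int :=
  let iniciais := pvIniciais nomes
  let v : Int := "AEIOU".toList.foldl (fun acc ch => acc + (iniciais.count ch : Int)) 0
  [v, (iniciais.length : Int) - v]

-- ===== PRECONDITION & SPEC =====
-- Pre_ excludes lists containing an empty name, on which both A and B raise IndexError at nome[0].
def Pre_nomes_com_vogais (nomes : List String) : Prop := ∀ nome ∈ nomes, nome ≠ ""
instance (nomes : List String) : Decidable (Pre_nomes_com_vogais nomes) := by unfold Pre_nomes_com_vogais; infer_instance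
def pvWitness_nomes_com_vogais : List String := ["Ana", "bob", "Eva"]
def Spec_nomes_com_vogais (nomes : List String) (out : List Int) : Prop := out = nomes_com_vogais_alt nomes
instance (nomes : List String) (out : List Int) : Decidable (Spec_nomes_com_vogais nomes out) := by unfold Spec_nomes_com_vogais; infer_instance

-- ===== CLAIM (what is proved, stated in full; the proofs are below) =====
def Claim_equal_nomes_com_vogais : Prop := ∀ (nomes : List String), Dom_nomes_com_vogais nomes → Pre_nomes_com_vogais nomes → Spec_nomes_com_vogais nomes (nomes_com_vogais nomes)

-- ===== LEMMAS AND PROOFS =====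

-- B's vowel sum over a list of initials, abbreviated for the lemmas.
def pvV (l : List Char) : Int :=
  "AEIOU".toList.foldl (fun acc ch => acc + (l.count ch : Int)) 0

theorem pvV_nil : pvV [] = 0 := by decide

theorem pvV_cons (c : Char) (l : List Char) :
    pvV (c :: l) = pvV l + (if c ∈ (['A', 'E', 'I', 'O', 'U'] : List Char) then 1 else 0) := by
  unfold pvV
  simp only [show "AEIOU".toList = ['A','E','I','O','U'] from rfl, List.foldl, List.count_cons]
  by_cases h : c ∈ (['A', 'E', 'I', 'O', 'U'] : List Char)
  · simp only [List.mem_cons, List.not_mem_nil, or_false] at h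
    rcases h with h | h | h | h | h <;> subst h <;> simp <;> ring
  · have hA : (c == 'A') = false := by
      simp only [List.mem_cons, List.not_mem_nil] at h; simp; intro hc; exact h (by simp [hc])
    have hE : (c == 'E') = false := by
      simp only [List.mem_cons, List.not_mem_nil] at h; simp; intro hc; exact h (by simp [hc])
    have hI : (c == 'I') = false := by
      simp only [List.mem_cons, List.not_mem_nil] at h; simp; intro hc; exact h (by simp [hc])
    have hO : (c == 'O') = false := by
      simp only [List.mem_cons, List.not_mem_nil] at h; simp; intro hc; exact h (by simp [hc])
    have hU : (c == 'U') = false := by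
      simp only [List.mem_cons, List.not_mem_nil] at h; simp; intro hc; exact h (by simp [hc])
    simp [hA, hE, hI, hO, hU, h]

-- Loop invariant: A's fold from (a, b) lands at (a + V, b + (len - V)) where V is B's vowel sum
-- over the initials and len is the number of initials.
theorem pv_fold_inv (nomes : List String) (a b : Int)
    (h : ∀ nome ∈ nomes, nome ≠ "") :
    nomes.foldl (fun t nome =>
      match PySem.Str.pyGet? nome 0 with
      | some c => if c ∈ (['A', 'E', 'I', 'O', 'U'] : List Char) then (t.1 + 1, t.2) else (t.1, t.2 + 1)
      | none => t) (a, b)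
    = (a + pvV (pvIniciais nomes),
       b + (((pvIniciais nomes).length : Int) - pvV (pvIniciais nomes))) := by
  induction nomes generalizing a b with
  | nil => simp [pvIniciais, pvV_nil]
  | cons x xs ih =>
    have hx : x ≠ "" := h x (List.mem_cons_self)
    have hxs : ∀ nome ∈ xs, nome ≠ "" := fun n hn => h n (List.mem_cons_of_mem _ hn)
    obtain ⟨c, hc⟩ : ∃ c, PySem.Str.pyGet? x 0 = some c := by
      rw [show (0:Int) = ((0:Nat):Int) from rfl, PySem.Str.pyGet?_natCast]
      cases hl : x.toList with
      | nil => exact absurd (by have := congrArg String.ofList hl; simpa using this) hx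
      | cons y ys => exact ⟨y, by simp⟩
    have hini : pvIniciais (x :: xs) = c :: pvIniciais xs := by
      have hc' : PySem.List.pyGet? x.toList 0 = some c := by
        simpa [PySem.Str.pyGet?, PySem.Chars.pyGet?] using hc
      simp [pvIniciais, hc']
    simp only [List.foldl_cons, hc, hini, pvV_cons, List.length_cons]
    by_cases hv : c ∈ (['A', 'E', 'I', 'O', 'U'] : List Char) <;>
      simp only [hv, if_true, if_false] <;>
      rw [ih _ _ hxs] <;>
      simp only [Prod.mk.injEq] <;> constructor <;> (push_cast; ring)

-- ===== VERDICT (by name: the statement is the Claim_ definition above) =====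
theorem nomes_com_vogais_spec : Claim_equal_nomes_com_vogais := by
  intro nomes _ hpre
  unfold Spec_nomes_com_vogais nomes_com_vogais nomes_com_vogais_alt
  dsimp only
  rw [pv_fold_inv nomes 0 0 hpre]
  simp only [zero_add]
  rfl
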